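-- pv_equiv track=rewrite | github.com/emilyh12345/induction_and_recursion | Assignment3.py | find_postage
-- ===== SOURCE A (Python) =====
-- def find_postage(amount):
--     for f in range(amount):
--         for r in range(amount):
--             if 5*f + 4*r == amount:
--                 return "five cent: " + str(f) + ", four cent: " + str(r)
--                 return 0
--     return "n/a"
--     return 0 #don't think you should have two returns like this - return "n/a" return 0 (unreachable code)
-- ===== SOURCE B (Python) =====
-- def find_postage(amount):
--     f = 0
--     while 5 * f <= amount:
--         if (amount - 5 * f) % 4 == 0:
--             return "five cent: " + str(f) + ", four cent: " + str((amount - 5 * f) // 4)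
--         f += 1
--     return "n/a"
-- ===== Notes on version B (the rewrite author's own statement) =====
-- stated objective: faster
-- what changed: Replace the nested brute-force scan over all (f, r) pairs by a single loop over f that computes r = (amount - 5f) // 4 directly via a divisibility check.
-- intended difference: On amount = 0, A's range(0) loop is empty so A returns 'n/a', while B returns 'five cent: 0, four cent: 0', which is the intended answer since 5*0 + 4*0 = 0. — e.g. on find_postage(0): A returns "n/a", B returns "five cent: 0, four cent: 0"
import Mathlib
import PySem

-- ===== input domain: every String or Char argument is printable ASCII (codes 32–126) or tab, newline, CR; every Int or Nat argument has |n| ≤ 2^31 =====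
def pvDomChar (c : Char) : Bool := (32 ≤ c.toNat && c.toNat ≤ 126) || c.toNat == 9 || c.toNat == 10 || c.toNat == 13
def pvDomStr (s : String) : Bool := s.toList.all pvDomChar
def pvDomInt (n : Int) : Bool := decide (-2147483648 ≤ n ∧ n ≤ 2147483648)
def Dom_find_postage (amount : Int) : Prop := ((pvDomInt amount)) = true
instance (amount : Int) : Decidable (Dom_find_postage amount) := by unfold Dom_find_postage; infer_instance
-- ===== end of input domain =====

-- B replaces A's O(amount^2) brute-force scan over all (f, r) pairs by a single loop over f
-- that checks divisibility of (amount - 5f) by 4 and computes r directly (objective: faster).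

-- ===== PORT A =====
def find_postage (amount : Int) : String :=
  match (PySem.List.pyRange 0 amount 1).findSome? (fun f =>
    (PySem.List.pyRange 0 amount 1).findSome? (fun r =>
      if 5*f + 4*r = amount then
        some ("five cent: " ++ PySem.Int.toStr f ++ ", four cent: " ++ PySem.Int.toStr r)
      else none)) with
  | some s => s
  | none => "n/a"

-- ===== PORT B =====
def find_postage_altLoop (amount f : Int) : String :=
  if 5*f ≤ amount then
    if PySem.Int.mod (amount - 5*f) 4 = 0 then
      "five cent: " ++ PySem.Int.toStr f ++ ", four cent: " ++
        PySem.Int.toStr (PySem.Int.floordiv (amount - 5*f) 4)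
    else find_postage_altLoop amount (f+1)
  else "n/a"
termination_by (amount - 5*f + 1).toNat
decreasing_by omega

def find_postage_alt (amount : Int) : String := find_postage_altLoop amount 0

-- ===== PRECONDITION & SPEC =====
-- On amount = 0, A's range(0) loop is empty so A returns "n/a", while B returns
-- "five cent: 0, four cent: 0", which is the intended answer since 5*0 + 4*0 = 0.
def D_find_postage (amount : Int) : Prop := amount = 0
instance (amount : Int) : Decidable (D_find_postage amount) := by unfold D_find_postage; infer_instance

def Spec_find_postage (amount : Int) (out : String) : Prop := ¬ D_find_postage amount → out = find_postage_alt amount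
instance (amount : Int) (out : String) : Decidable (Spec_find_postage amount out) := by unfold Spec_find_postage; infer_instance

def pvDiffWitness_find_postage : Int := 0
def pvDiffWitnessOut_find_postage : String × String := ("n/a", "five cent: 0, four cent: 0")

-- ===== CLAIM (what is proved, stated in full; the proofs are below) =====
def Claim_unchanged_find_postage : Prop := ∀ (amount : Int), Dom_find_postage amount → Spec_find_postage amount (find_postage amount)
def Claim_changed_find_postage : Prop := Dom_find_postage (pvDiffWitness_find_postage) ∧ D_find_postage (pvDiffWitness_find_postage) ∧ find_postage (pvDiffWitness_find_postage) = pvDiffWitnessOut_find_postage.1 ∧ find_postage_alt (pvDiffWitness_find_postage) = pvDiffWitnessOut_find_postage.2 ∧ pvDiffWitnessOut_find_postage.1 ≠ pvDiffWitnessOut_find_postage.2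
def Claim_exact_find_postage : Prop := ∀ (amount : Int), Dom_find_postage amount → D_find_postage amount → find_postage amount ≠ find_postage_alt amount

-- ===== LEMMAS AND PROOFS =====

-- the message string both programs build
def fpMsg (f r : Int) : String :=
  "five cent: " ++ PySem.Int.toStr f ++ ", four cent: " ++ PySem.Int.toStr r

theorem findSome?_ext {α β : Type} (l : List α) (g1 g2 : α → Option β)
    (h : ∀ x ∈ l, g1 x = g2 x) : l.findSome? g1 = l.findSome? g2 := by
  induction l with
  | nil => rfl
  | cons a t ih =>
    simp only [List.findSome?_cons, h a (by simp)]
    cases g2 a with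
    | none => exact ih (fun x hx => h x (by simp [hx]))
    | some b => rfl

theorem findSome?_eq_none_of {α β : Type} (l : List α) (g : α → Option β)
    (h : ∀ x ∈ l, g x = none) : l.findSome? g = none := by
  induction l with
  | nil => rfl
  | cons a t ih =>
    simp only [List.findSome?_cons, h a (by simp)]
    exact ih (fun x hx => h x (by simp [hx]))

theorem findSome?_unique {α β : Type} (l : List α) (g : α → Option β) (x : α) (v : β)
    (hx : x ∈ l) (hgx : g x = some v) (huniq : ∀ y ∈ l, g y ≠ none → y = x) :
    l.findSome? g = some v := by
  induction l with
  | nil => cases hx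
  | cons a t ih =>
    rcases List.mem_cons.mp hx with h | h
    · subst h; simp [hgx]
    · simp only [List.findSome?_cons]
      cases hga : g a with
      | some b =>
        have : a = x := huniq a (by simp) (by simp [hga])
        subst this; rw [hgx] at hga; simpa using hga.symm
      | none => exact ih h (fun y hy => huniq y (by simp [hy]))

-- the value of A's inner loop, for a fixed f ≥ 0 and amount > 0
theorem fp_inner (amount f : Int) (hpos : 0 < amount) (hf : 0 ≤ f) :
    (PySem.List.pyRange 0 amount 1).findSome? (fun r =>
      if 5*f + 4*r = amount then some (fpMsg f r) else none)
    = if 5*f ≤ amount ∧ (4 : Int) ∣ (amount - 5*f) then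
        some (fpMsg f (PySem.Int.floordiv (amount - 5*f) 4)) else none := by
  by_cases h : 5*f ≤ amount ∧ (4 : Int) ∣ (amount - 5*f)
  · rw [if_pos h]
    obtain ⟨hle, k, hk⟩ := h
    have hfd : PySem.Int.floordiv (amount - 5*f) 4 = k := by
      rw [PySem.Int.floordiv_eq_ediv_of_pos (by norm_num), hk]
      omega
    rw [hfd]
    refine findSome?_unique _ _ k _ ?_ ?_ ?_
    · rw [PySem.List.mem_pyRange_one]; omega
    · rw [if_pos (by omega)]
    · intro y _ hy
      by_contra hne
      have : ¬ (5*f + 4*y = amount) := by omega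
      simp [this] at hy
  · rw [if_neg h]
    refine findSome?_eq_none_of _ _ (fun y hy => ?_)
    rw [PySem.List.mem_pyRange_one] at hy
    have : ¬ (5*f + 4*y = amount) := by
      intro he
      exact h ⟨by omega, ⟨y, by omega⟩⟩
    simp [this]

-- B's loop computes the first f ≥ current index that A's outer loop would accept
theorem fp_outer (n : Nat) : ∀ (amount f : Int), (amount - 5*f + 1).toNat ≤ n →
    0 < amount → 0 ≤ f →
    find_postage_altLoop amount f =
      match (PySem.List.pyRange f amount 1).findSome? (fun f' =>
        if 5*f' ≤ amount ∧ (4 : Int) ∣ (amount - 5*f') then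
          some (fpMsg f' (PySem.Int.floordiv (amount - 5*f') 4)) else none) with
      | some s => s
      | none => "n/a" := by
  induction n with
  | zero =>
    intro amount f hn hpos hf
    have hgt : amount < 5*f := by omega
    rw [find_postage_altLoop, if_neg (by omega)]
    rw [findSome?_eq_none_of _ _ (fun y hy => ?_)]
    rw [PySem.List.mem_pyRange_one] at hy
    rw [if_neg (by omega)]
  | succ n ih =>
    intro amount f hn hpos hf
    by_cases hle : 5*f ≤ amount
    · have hcons : PySem.List.pyRange f amount 1 = f :: PySem.List.pyRange (f+1) amount 1 :=
        PySem.List.pyRange_one_cons (by omega)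
      rw [find_postage_altLoop, if_pos hle, hcons, List.findSome?_cons]
      by_cases hdvd : (4 : Int) ∣ (amount - 5*f)
      · rw [if_pos (PySem.Int.mod_eq_zero_iff_dvd _ _ |>.mpr hdvd)]
        rw [if_pos ⟨hle, hdvd⟩]
        rfl
      · rw [if_neg (by rw [PySem.Int.mod_eq_zero_iff_dvd]; exact hdvd)]
        rw [if_neg (by tauto)]
        exact ih amount (f+1) (by omega) hpos (by omega)
    · rw [find_postage_altLoop, if_neg hle]
      rw [findSome?_eq_none_of _ _ (fun y hy => ?_)]
      rw [PySem.List.mem_pyRange_one] at hy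
      rw [if_neg (by omega)]

theorem fp_alt_zero : find_postage_alt 0 = "five cent: 0, four cent: 0" := by
  rw [find_postage_alt, find_postage_altLoop]
  norm_num [PySem.Int.mod, PySem.Int.floordiv]
  decide

theorem fp_agree (amount : Int) (h : amount ≠ 0) :
    find_postage amount = find_postage_alt amount := by
  rcases lt_or_gt_of_ne h with hneg | hpos
  · rw [find_postage, find_postage_alt, find_postage_altLoop,
      if_neg (by omega), PySem.List.pyRange_one_eq_nil (by omega)]
    rfl
  · rw [find_postage_alt, fp_outer (amount - 5*0 + 1).toNat amount 0 le_rfl hpos le_rfl]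
    rw [find_postage]
    have hext : (PySem.List.pyRange 0 amount 1).findSome? (fun f =>
        (PySem.List.pyRange 0 amount 1).findSome? (fun r =>
          if 5*f + 4*r = amount then
            some ("five cent: " ++ PySem.Int.toStr f ++ ", four cent: " ++ PySem.Int.toStr r)
          else none))
        = (PySem.List.pyRange 0 amount 1).findSome? (fun f' =>
        if 5*f' ≤ amount ∧ (4 : Int) ∣ (amount - 5*f') then
          some (fpMsg f' (PySem.Int.floordiv (amount - 5*f') 4)) else none) := by
      refine findSome?_ext _ _ _ (fun f hfmem => ?_)
      rw [PySem.List.mem_pyRange_one] at hfmem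
      exact fp_inner amount f hpos hfmem.1
    rw [hext]

-- ===== VERDICT (by name: the statement is the Claim_ definition above) =====
theorem find_postage_spec : Claim_unchanged_find_postage := by
  intro amount _ hnd
  exact fp_agree amount hnd

theorem find_postage_changed : Claim_changed_find_postage := by
  unfold Claim_changed_find_postage pvDiffWitness_find_postage pvDiffWitnessOut_find_postage
  exact ⟨by decide, rfl, by decide, fp_alt_zero, by decide⟩

theorem find_postage_tight : Claim_exact_find_postage := by
  intro amount _ hd
  subst hd
  rw [fp_alt_zero]
  decide
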